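-- pv_equiv track=rewrite | github.com/sboupda/atdd | src/atdd/coder/validators/test_complexity_typescript.py | _find_opening_brace
-- ===== SOURCE A (Python) =====
-- def _find_opening_brace(content: str, start: int) -> int:
--     """Find the first '{' after start, skipping parens and arrow."""
--     i = start
--     paren_depth = 0
--     while i < len(content):
--         ch = content[i]
--         if ch == "(":
--             paren_depth += 1
--         elif ch == ")":
--             paren_depth -= 1
--         elif ch == "{" and paren_depth == 0:
--             return i
--         elif ch == "\n" and paren_depth == 0:
--             # Check if this is an expression arrow (no braces)
--             # Look back for =>
--             segment = content[start:i]
--             if "=>" in segment and "{" not in segment: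
--                 return -1
--         i += 1
--     return -1
-- ===== SOURCE B (Python) =====
-- def _find_opening_brace(content: str, start: int) -> int:
--     """Find the first '{' after start, skipping parens and arrow (single pass, incremental flags)."""
--     depth = 0
--     seen_arrow = False
--     seen_brace = False
--     prev = ""
--     for i, ch in enumerate(content[start:], start):
--         if ch == "{":
--             if depth == 0:
--                 return i
--             seen_brace = True
--         elif ch == "\n":
--             if depth == 0 and seen_arrow and not seen_brace:
--                 return -1
--         elif ch == "(":
--             depth += 1
--         elif ch == ")":
--             depth -= 1
--         elif ch == ">" and prev == "=":
--             seen_arrow = True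
--         prev = ch
--     return -1
-- ===== Notes on version B (the rewrite author's own statement) =====
-- stated objective: faster
-- what changed: Instead of re-slicing content[start:i] and rescanning it for '=>' and '{' at every newline, B makes a single left-to-right pass maintaining incremental seen-arrow/seen-brace flags and the previous character.
-- outside the precondition, e.g. on _find_opening_brace('>\n{=', -1): A returns 2, B returns -1
import Mathlib
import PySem

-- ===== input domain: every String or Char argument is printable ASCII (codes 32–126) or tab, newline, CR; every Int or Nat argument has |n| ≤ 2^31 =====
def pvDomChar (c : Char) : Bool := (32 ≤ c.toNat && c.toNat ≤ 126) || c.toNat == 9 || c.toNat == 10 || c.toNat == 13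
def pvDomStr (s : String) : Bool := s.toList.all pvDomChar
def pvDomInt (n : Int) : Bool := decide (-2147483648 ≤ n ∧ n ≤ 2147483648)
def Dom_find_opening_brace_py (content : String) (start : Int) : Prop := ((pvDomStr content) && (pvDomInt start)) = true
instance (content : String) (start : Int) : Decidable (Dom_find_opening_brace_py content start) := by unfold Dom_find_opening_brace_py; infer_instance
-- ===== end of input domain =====

-- B replaces A's per-newline re-slice-and-rescan of content[start:i] by one pass with incremental
-- seen-arrow / seen-brace flags (objective: faster).

-- ===== PORT A =====
-- literal transliteration of A's while loop; fuel bounds the iteration count (enough for start ≥ 0);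
-- the Python local 'segment = content[start:i]' is written out inline at its two uses
def pvALoop (cs : List Char) (start : Int) : Nat → Int → Int → Int
  | 0, _, _ => -1
  | fuel + 1, i, depth =>
    if i < (cs.length : Int) then
      match PySem.List.pyGet? cs i with
      | none => -1   -- Python raises IndexError here (only reachable for start < -len; outside Pre_)
      | some ch =>
        if ch = '(' then pvALoop cs start fuel (i + 1) (depth + 1)
        else if ch = ')' then pvALoop cs start fuel (i + 1) (depth - 1)
        else if ch = '{' ∧ depth = 0 then i
        else if ch = '\n' ∧ depth = 0 then
          if PySem.Chars.isIn ['=', '>'] (PySem.List.slice cs (some start) (some i)) = true ∧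
              '{' ∉ PySem.List.slice cs (some start) (some i) then -1
          else pvALoop cs start fuel (i + 1) depth
        else pvALoop cs start fuel (i + 1) depth
    else -1

def find_opening_brace_py (content : String) (start : Int) : Int :=
  pvALoop content.toList start (content.toList.length + 1) start 0

-- ===== PORT B =====
-- literal transliteration of Source B's single pass: walk the suffix once with depth, prev char and flags
def pvBLoop : List Char → Int → Int → Option Char → Bool → Bool → Int
  | [], _, _, _, _, _ => -1
  | ch :: rest, i, depth, prev, seenArrow, seenBrace =>
    if ch = '{' then
      if depth = 0 then i
      else pvBLoop rest (i + 1) depth (some ch) seenArrow true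
    else if ch = '\n' then
      if depth = 0 ∧ seenArrow = true ∧ seenBrace = false then -1
      else pvBLoop rest (i + 1) depth (some ch) seenArrow seenBrace
    else if ch = '(' then pvBLoop rest (i + 1) (depth + 1) (some ch) seenArrow seenBrace
    else if ch = ')' then pvBLoop rest (i + 1) (depth - 1) (some ch) seenArrow seenBrace
    else if ch = '>' ∧ prev = some '=' then pvBLoop rest (i + 1) depth (some ch) true seenBrace
    else pvBLoop rest (i + 1) depth (some ch) seenArrow seenBrace

def find_opening_brace_py_alt (content : String) (start : Int) : Int :=
  pvBLoop (content.toList.drop start.toNat) start 0 none false false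

-- ===== PRECONDITION & SPEC =====
-- Pre_ excludes negative start, outside the function's natural domain: there A's negative-index
-- wraparound and its mixed-sign slice content[start:i] are accidental (and A raises IndexError
-- for start < -len on nonempty content).
def Pre_find_opening_brace_py (content : String) (start : Int) : Prop := 0 ≤ start
instance (content : String) (start : Int) : Decidable (Pre_find_opening_brace_py content start) := by
  unfold Pre_find_opening_brace_py; infer_instance

def pvWitness_find_opening_brace_py : String × Int := ("fn x =>\n  (y) {z}", 0)

def Spec_find_opening_brace_py (content : String) (start : Int) (out : Int) : Prop := out = find_opening_brace_py_alt content start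
instance (content : String) (start : Int) (out : Int) : Decidable (Spec_find_opening_brace_py content start out) := by unfold Spec_find_opening_brace_py; infer_instance

-- ===== CLAIM (what is proved, stated in full; the proofs are below) =====
def Claim_equal_find_opening_brace_py : Prop := ∀ (content : String) (start : Int), Dom_find_opening_brace_py content start → Pre_find_opening_brace_py content start → Spec_find_opening_brace_py content start (find_opening_brace_py content start)

-- ===== LEMMAS AND PROOFS =====

-- a two-character pattern is an infix of l ++ [c] iff it is an infix of l, or ends exactly at c
lemma pair_infix_append (a b c : Char) (l : List Char) :
    [a, b] <:+: (l ++ [c]) ↔ [a, b] <:+: l ∨ (l.getLast? = some a ∧ c = b) := by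
  constructor
  · rintro ⟨s, t, h⟩
    rcases t.eq_nil_or_concat with rfl | ⟨t', d, rfl⟩
    · right
      simp only [List.append_nil] at h
      have h2 : (s ++ [a]) ++ [b] = l ++ [c] := by simpa using h
      obtain ⟨h3, h4⟩ := List.append_inj' h2 (by simp)
      simp only [List.cons.injEq] at h4
      exact ⟨by rw [← h3]; simp, h4.1.symm⟩
    · left
      have h2 : (s ++ [a, b] ++ t') ++ [d] = l ++ [c] := by simpa using h
      exact ⟨s, t', (List.append_inj' h2 (by simp)).1⟩
  · rintro (h | ⟨h1, rfl⟩)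
    · exact h.trans ⟨[], [c], by simp⟩
    · obtain ⟨l', rfl⟩ := List.getLast?_eq_some_iff.mp h1
      exact ⟨l', [], by simp⟩

lemma isIn_pair_append (a b c : Char) (l : List Char) :
    PySem.Chars.isIn [a, b] (l ++ [c]) =
      (PySem.Chars.isIn [a, b] l || (l.getLast? == some a && (c == b))) := by
  rw [Bool.eq_iff_iff]
  simp [PySem.Chars.isIn_iff_infix, pair_infix_append]

lemma brace_append (x : Char) (s : List Char) :
    decide ('{' ∈ s ++ [x]) = (decide ('{' ∈ s) || (x == '{')) := by
  rw [Bool.eq_iff_iff]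
  simp only [Bool.or_eq_true, decide_eq_true_eq, beq_iff_eq, List.mem_append,
    List.mem_singleton]
  exact or_congr Iff.rfl eq_comm

-- the loop invariant: A's loop at index i equals B's loop on the remaining suffix, with B's flags
-- being exactly the membership facts A recomputes from the segment content[start:i]
lemma loop_eq (cs : List Char) (s : Nat) :
    ∀ (fuel i : Nat) (depth : Int), s ≤ i → cs.length - i < fuel →
      pvALoop cs (s : Int) fuel (i : Int) depth =
        pvBLoop (cs.drop i) (i : Int) depth
          (((cs.drop s).take (i - s)).getLast?)
          (PySem.Chars.isIn ['=', '>'] ((cs.drop s).take (i - s)))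
          (decide ('{' ∈ (cs.drop s).take (i - s))) := by
  intro fuel
  induction fuel with
  | zero => intro i depth _ hf; omega
  | succ fuel ih =>
    intro i depth hsi hf
    by_cases hlt : i < cs.length
    · have hget : PySem.List.pyGet? cs (i : Int) = some cs[i] := by
        simp [PySem.List.pyGet?_natCast, List.getElem?_eq_getElem hlt]
      have hdrop : cs.drop i = cs[i] :: cs.drop (i + 1) := List.drop_eq_getElem_cons hlt
      have hseg : (cs.drop s).take (i + 1 - s) = (cs.drop s).take (i - s) ++ [cs[i]] := by
        rw [show i + 1 - s = (i - s) + 1 by omega, List.take_add_one]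
        have hx : (cs.drop s)[i - s]? = some cs[i] := by
          rw [List.getElem?_drop, show s + (i - s) = i by omega,
            List.getElem?_eq_getElem hlt]
        simp [hx]
      have hslice : PySem.List.slice cs (some (s : Int)) (some (i : Int)) =
          (cs.drop s).take (i - s) := PySem.List.slice_natCast cs s i
      set seg := (cs.drop s).take (i - s) with hsegdef
      have hcast : ((i : Int) + 1) = ((i + 1 : Nat) : Int) := by push_cast; ring
      have ihh : ∀ (depth' : Int) (ar br : Bool),
          (PySem.Chars.isIn ['=', '>'] seg || (seg.getLast? == some '=' && (cs[i] == '>'))) = ar →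
          (decide ('{' ∈ seg) || (cs[i] == '{')) = br →
          pvALoop cs (s : Int) fuel ((i : Int) + 1) depth' =
            pvBLoop (cs.drop (i + 1)) ((i : Int) + 1) depth' (some cs[i]) ar br := by
        intro depth' ar br ha hb
        rw [← ha, ← hb, hcast, ih (i + 1) depth' (by omega) (by omega), hseg,
          List.getLast?_concat, isIn_pair_append, brace_append]
      have hA : pvALoop cs (s : Int) (fuel + 1) (i : Int) depth =
          (if cs[i] = '(' then pvALoop cs (s : Int) fuel ((i : Int) + 1) (depth + 1)
           else if cs[i] = ')' then pvALoop cs (s : Int) fuel ((i : Int) + 1) (depth - 1)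
           else if cs[i] = '{' ∧ depth = 0 then (i : Int)
           else if cs[i] = '\n' ∧ depth = 0 then
             if PySem.Chars.isIn ['=', '>'] seg = true ∧ '{' ∉ seg then -1
             else pvALoop cs (s : Int) fuel ((i : Int) + 1) depth
           else pvALoop cs (s : Int) fuel ((i : Int) + 1) depth) := by
        rw [show pvALoop cs (s : Int) (fuel + 1) (i : Int) depth =
            (if (i : Int) < (cs.length : Int) then
              match PySem.List.pyGet? cs (i : Int) with
              | none => -1
              | some ch =>
                if ch = '(' then pvALoop cs (s : Int) fuel ((i : Int) + 1) (depth + 1)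
                else if ch = ')' then pvALoop cs (s : Int) fuel ((i : Int) + 1) (depth - 1)
                else if ch = '{' ∧ depth = 0 then (i : Int)
                else if ch = '\n' ∧ depth = 0 then
                  if PySem.Chars.isIn ['=', '>'] (PySem.List.slice cs (some (s : Int)) (some (i : Int))) = true ∧
                      '{' ∉ PySem.List.slice cs (some (s : Int)) (some (i : Int)) then -1
                  else pvALoop cs (s : Int) fuel ((i : Int) + 1) depth
                else pvALoop cs (s : Int) fuel ((i : Int) + 1) depth
            else -1) from rfl]
        rw [if_pos (show (i : Int) < (cs.length : Int) by exact_mod_cast hlt), hget, hslice]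
      have hB : pvBLoop (cs.drop i) (i : Int) depth seg.getLast?
            (PySem.Chars.isIn ['=', '>'] seg) (decide ('{' ∈ seg)) =
          (if cs[i] = '{' then
            if depth = 0 then (i : Int)
            else pvBLoop (cs.drop (i + 1)) ((i : Int) + 1) depth (some cs[i])
              (PySem.Chars.isIn ['=', '>'] seg) true
          else if cs[i] = '\n' then
            if depth = 0 ∧ PySem.Chars.isIn ['=', '>'] seg = true ∧ decide ('{' ∈ seg) = false then -1
            else pvBLoop (cs.drop (i + 1)) ((i : Int) + 1) depth (some cs[i])
              (PySem.Chars.isIn ['=', '>'] seg) (decide ('{' ∈ seg))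
          else if cs[i] = '(' then pvBLoop (cs.drop (i + 1)) ((i : Int) + 1) (depth + 1) (some cs[i])
              (PySem.Chars.isIn ['=', '>'] seg) (decide ('{' ∈ seg))
          else if cs[i] = ')' then pvBLoop (cs.drop (i + 1)) ((i : Int) + 1) (depth - 1) (some cs[i])
              (PySem.Chars.isIn ['=', '>'] seg) (decide ('{' ∈ seg))
          else if cs[i] = '>' ∧ seg.getLast? = some '=' then
            pvBLoop (cs.drop (i + 1)) ((i : Int) + 1) depth (some cs[i]) true (decide ('{' ∈ seg))
          else pvBLoop (cs.drop (i + 1)) ((i : Int) + 1) depth (some cs[i])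
              (PySem.Chars.isIn ['=', '>'] seg) (decide ('{' ∈ seg))) := by
        rw [hdrop]
        rfl
      rw [hA, hB]
      by_cases hp : cs[i] = '('
      · rw [if_pos hp, if_neg (by rw [hp]; simp), if_neg (by rw [hp]; simp), if_pos hp]
        exact ihh _ _ _ (by rw [hp]; simp) (by rw [hp]; simp)
      · by_cases hq : cs[i] = ')'
        · rw [if_neg hp, if_pos hq, if_neg (by rw [hq]; simp), if_neg (by rw [hq]; simp),
            if_neg hp, if_pos hq]
          exact ihh _ _ _ (by rw [hq]; simp) (by rw [hq]; simp)
        · by_cases hcb : cs[i] = '{'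
          · by_cases hd : depth = 0
            · rw [if_neg hp, if_neg hq, if_pos ⟨hcb, hd⟩, if_pos hcb, if_pos hd]
            · rw [if_neg hp, if_neg hq, if_neg (fun h => hd h.2),
                if_neg (fun h => hd h.2), if_pos hcb, if_neg hd]
              exact ihh _ _ _ (by rw [hcb]; simp) (by rw [hcb]; simp)
          · by_cases hnl : cs[i] = '\n'
            · by_cases hd : depth = 0
              · rw [if_neg hp, if_neg hq, if_neg (fun h => hcb h.1), if_pos ⟨hnl, hd⟩,
                  if_neg hcb, if_pos hnl]
                by_cases hc : PySem.Chars.isIn ['=', '>'] seg = true ∧ '{' ∉ seg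
                · rw [if_pos hc, if_pos ⟨hd, hc.1, by simp [hc.2]⟩]
                · rw [if_neg hc,
                    if_neg (by
                      rintro ⟨_, h3, h4⟩
                      exact hc ⟨h3, by simpa using h4⟩)]
                  exact ihh _ _ _ (by rw [hnl]; simp) (by rw [hnl]; simp)
              · rw [if_neg hp, if_neg hq, if_neg (fun h => hcb h.1), if_neg (fun h => hd h.2),
                  if_neg hcb, if_pos hnl, if_neg (fun h => hd h.1)]
                exact ihh _ _ _ (by rw [hnl]; simp) (by rw [hnl]; simp)
            · by_cases har : cs[i] = '>' ∧ seg.getLast? = some '='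
              · rw [if_neg hp, if_neg hq, if_neg (fun h => hcb h.1), if_neg (fun h => hnl h.1),
                  if_neg hcb, if_neg hnl, if_neg hp, if_neg hq, if_pos har]
                exact ihh _ _ _ (by rw [har.1, har.2]; simp) (by rw [har.1]; simp)
              · rw [if_neg hp, if_neg hq, if_neg (fun h => hcb h.1), if_neg (fun h => hnl h.1),
                  if_neg hcb, if_neg hnl, if_neg hp, if_neg hq, if_neg har]
                refine ihh _ _ _ ?_ (by
                  have : (cs[i] == '{') = false := by simp [hcb]
                  rw [this, Bool.or_false])
                have h1 : (seg.getLast? == some '=' && (cs[i] == '>')) = false := by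
                  by_cases hl : seg.getLast? = some '='
                  · have hne : cs[i] ≠ '>' := fun hh => har ⟨hh, hl⟩
                    simp [hl, hne]
                  · simp [hl]
                rw [h1, Bool.or_false]
    · have hle : cs.length ≤ i := by omega
      rw [show pvALoop cs (s : Int) (fuel + 1) (i : Int) depth =
          (if (i : Int) < (cs.length : Int) then
            match PySem.List.pyGet? cs (i : Int) with
            | none => -1
            | some ch =>
              if ch = '(' then pvALoop cs (s : Int) fuel ((i : Int) + 1) (depth + 1)
              else if ch = ')' then pvALoop cs (s : Int) fuel ((i : Int) + 1) (depth - 1)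
              else if ch = '{' ∧ depth = 0 then (i : Int)
              else if ch = '\n' ∧ depth = 0 then
                if PySem.Chars.isIn ['=', '>'] (PySem.List.slice cs (some (s : Int)) (some (i : Int))) = true ∧
                    '{' ∉ PySem.List.slice cs (some (s : Int)) (some (i : Int)) then -1
                else pvALoop cs (s : Int) fuel ((i : Int) + 1) depth
              else pvALoop cs (s : Int) fuel ((i : Int) + 1) depth
          else -1) from rfl,
        if_neg (by exact_mod_cast not_lt.mpr hle),
        List.drop_eq_nil_of_le hle]
      rfl

-- ===== VERDICT (by name: the statement is the Claim_ definition above) =====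
theorem find_opening_brace_py_spec : Claim_equal_find_opening_brace_py := by
  intro content start _hdom hpre
  unfold Spec_find_opening_brace_py find_opening_brace_py find_opening_brace_py_alt
  have hs : start = ((start.toNat : Nat) : Int) := (Int.toNat_of_nonneg hpre).symm
  rw [hs, loop_eq content.toList start.toNat (content.toList.length + 1) start.toNat 0
    (le_refl _) (by omega)]
  simp [Int.toNat_of_nonneg hpre, show PySem.Chars.isIn ['=', '>'] ([] : List Char) = false from rfl]
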